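-- pv_equiv track=rewrite | github.com/genolyx/service-daemon | app/services/carrier_screening/acmg.py | _determine_classification
-- ===== SOURCE A (Python) =====
-- from typing import Dict, Any, Optional, List
--
-- def _determine_classification(criteria: List[str]) -> str:
--     """ACMG 기준 조합에 따른 최종 분류를 결정합니다."""
--     has = set(criteria)
--
--     # Pathogenic: PVS1 + PM2, or PS1 + PM2, etc.
--     pvs = [c for c in has if c.startswith("PVS")]
--     ps = [c for c in has if c.startswith("PS")]
--     pm = [c for c in has if c.startswith("PM")]
--     pp = [c for c in has if c.startswith("PP")]
--     ba = [c for c in has if c.startswith("BA")]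
--     bs = [c for c in has if c.startswith("BS")]
--     bp = [c for c in has if c.startswith("BP")]
--
--     # Stand-alone Benign (BA1 already handled in classify_acmg_lite early-return,
--     # but keep here as safety net for direct calls to _determine_classification)
--     if ba:
--         return "Benign"
--
--     # Benign (two strong benign, or strong + supporting)
--     if len(bs) >= 2:
--         return "Benign"
--     if bs and bp:
--         return "Likely Benign"
--     if len(bp) >= 2:
--         return "Likely Benign"
--
--     # Pathogenic
--     if pvs and (ps or len(pm) >= 1):
--         return "Pathogenic"
--     if len(ps) >= 2:
--         return "Pathogenic"
--     if ps and (len(pm) >= 1 or len(pp) >= 2):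
--         return "Pathogenic"
--
--     # Likely Pathogenic
--     if pvs and (pm or pp):
--         return "Likely Pathogenic"
--     if ps and (pm or pp):
--         return "Likely Pathogenic"
--     if len(pm) >= 3:
--         return "Likely Pathogenic"
--     if len(pm) >= 2 and len(pp) >= 2:
--         return "Likely Pathogenic"
--
--     # VUS (default when evidence is mixed or insufficient)
--     if pvs or ps or pm or pp:
--         return "VUS"
--
--     # Likely benign (single benign evidence)
--     if bs or bp:
--         return "Likely Benign"
--
--     return "VUS"
-- ===== SOURCE B (Python) =====
-- _PREFIXES = ("PVS", "PS", "PM", "PP", "BA", "BS", "BP")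
--
-- # The whole decision cascade as DATA: ordered rules label -> DNF of minimum
-- # category counts; a generic matcher returns the first label whose DNF holds.
-- _RULES = [
--     ("Benign", [{"BA": 1}, {"BS": 2}]),
--     ("Likely Benign", [{"BS": 1, "BP": 1}, {"BP": 2}]),
--     ("Pathogenic", [{"PVS": 1, "PS": 1}, {"PVS": 1, "PM": 1}, {"PS": 2},
--                     {"PS": 1, "PM": 1}, {"PS": 1, "PP": 2}]),
--     ("Likely Pathogenic", [{"PVS": 1, "PM": 1}, {"PVS": 1, "PP": 1},
--                            {"PS": 1, "PM": 1}, {"PS": 1, "PP": 1},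
--                            {"PM": 3}, {"PM": 2, "PP": 2}]),
--     ("VUS", [{"PVS": 1}, {"PS": 1}, {"PM": 1}, {"PP": 1}]),
--     ("Likely Benign", [{"BS": 1}, {"BP": 1}]),
-- ]
--
--
-- def _determine_classification(criteria):
--     """Table-driven ACMG classifier: count categories once, then scan the rule table."""
--     counts = {}
--     for c in set(criteria):
--         for p in _PREFIXES:
--             if c.startswith(p):
--                 counts[p] = counts.get(p, 0) + 1
--                 break
--     for label, alternatives in _RULES:
--         if any(all(counts.get(k, 0) >= v for k, v in req.items())
--                for req in alternatives):
--             return label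
--     return "VUS"
-- ===== Notes on version B (the rewrite author's own statement) =====
-- stated objective: alternative
-- what changed: Replaces A's seven list comprehensions plus a hard-coded 14-branch if/elif cascade with a table-driven classifier: one categorising pass builds a prefix-count dict (inner prefix loop with break), and a generic matcher scans an ordered rule table (label -> DNF of minimum category counts) returning the first matching label.
import Mathlib
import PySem

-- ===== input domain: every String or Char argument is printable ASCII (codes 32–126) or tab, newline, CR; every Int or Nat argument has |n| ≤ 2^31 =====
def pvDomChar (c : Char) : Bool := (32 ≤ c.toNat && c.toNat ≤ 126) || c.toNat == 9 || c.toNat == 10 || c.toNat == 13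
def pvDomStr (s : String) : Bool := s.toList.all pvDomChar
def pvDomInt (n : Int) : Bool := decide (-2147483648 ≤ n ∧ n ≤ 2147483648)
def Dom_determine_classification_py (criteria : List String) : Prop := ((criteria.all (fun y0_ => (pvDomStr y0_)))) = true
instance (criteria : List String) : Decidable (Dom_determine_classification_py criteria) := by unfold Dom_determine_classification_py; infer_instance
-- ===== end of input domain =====

-- B replaces A's seven comprehensions + hard-coded if-cascade by a table-driven classifier:
-- one categorising pass building a count dict, then a generic scan of a rule table (simpler data-driven decomposition).

-- ===== PORT A =====
def determine_classification_py (criteria : List String) : String :=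
  let has : PySem.Set String := PySem.Set.ofList criteria
  let pvs := has.filter (fun c => PySem.Str.startswith c "PVS")
  let ps  := has.filter (fun c => PySem.Str.startswith c "PS")
  let pm  := has.filter (fun c => PySem.Str.startswith c "PM")
  let pp  := has.filter (fun c => PySem.Str.startswith c "PP")
  let ba  := has.filter (fun c => PySem.Str.startswith c "BA")
  let bs  := has.filter (fun c => PySem.Str.startswith c "BS")
  let bp  := has.filter (fun c => PySem.Str.startswith c "BP")
  if ba ≠ [] then "Benign"
  else if 2 ≤ bs.length then "Benign"
  else if bs ≠ [] ∧ bp ≠ [] then "Likely Benign"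
  else if 2 ≤ bp.length then "Likely Benign"
  else if pvs ≠ [] ∧ (ps ≠ [] ∨ 1 ≤ pm.length) then "Pathogenic"
  else if 2 ≤ ps.length then "Pathogenic"
  else if ps ≠ [] ∧ (1 ≤ pm.length ∨ 2 ≤ pp.length) then "Pathogenic"
  else if pvs ≠ [] ∧ (pm ≠ [] ∨ pp ≠ []) then "Likely Pathogenic"
  else if ps ≠ [] ∧ (pm ≠ [] ∨ pp ≠ []) then "Likely Pathogenic"
  else if 3 ≤ pm.length then "Likely Pathogenic"
  else if 2 ≤ pm.length ∧ 2 ≤ pp.length then "Likely Pathogenic"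
  else if pvs ≠ [] ∨ ps ≠ [] ∨ pm ≠ [] ∨ pp ≠ [] then "VUS"
  else if bs ≠ [] ∨ bp ≠ [] then "Likely Benign"
  else "VUS"

-- ===== PORT B =====
-- B's module constants: the category prefixes and the ordered rule table (label, DNF of minimum counts)
def pvPrefixes : List String := ["PVS", "PS", "PM", "PP", "BA", "BS", "BP"]

def pvRules : List (String × List (List (String × Int))) :=
  [ ("Benign", [[("BA", 1)], [("BS", 2)]]),
    ("Likely Benign", [[("BS", 1), ("BP", 1)], [("BP", 2)]]),
    ("Pathogenic", [[("PVS", 1), ("PS", 1)], [("PVS", 1), ("PM", 1)], [("PS", 2)],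
                    [("PS", 1), ("PM", 1)], [("PS", 1), ("PP", 2)]]),
    ("Likely Pathogenic", [[("PVS", 1), ("PM", 1)], [("PVS", 1), ("PP", 1)],
                           [("PS", 1), ("PM", 1)], [("PS", 1), ("PP", 1)],
                           [("PM", 3)], [("PM", 2), ("PP", 2)]]),
    ("VUS", [[("PVS", 1)], [("PS", 1)], [("PM", 1)], [("PP", 1)]]),
    ("Likely Benign", [[("BS", 1)], [("BP", 1)]]) ]

-- body of B's counting loop: first matching prefix (the inner for-with-break) gets its count bumped
def pvCountStep (d : PySem.Dict String Int) (c : String) : PySem.Dict String Int :=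
  match pvPrefixes.find? (fun p => PySem.Str.startswith c p) with
  | some p => d.insert p (d.getD p 0 + 1)
  | none => d

-- B's rule scan: return the first label one of whose requirement sets is met
def pvScan (counts : PySem.Dict String Int) : List (String × List (List (String × Int))) → String
  | [] => "VUS"
  | (label, alts) :: rest =>
      if alts.any (fun req => req.all (fun kv => decide (kv.2 ≤ counts.getD kv.1 0))) then label
      else pvScan counts rest

def determine_classification_py_alt (criteria : List String) : String :=
  let counts := (PySem.Set.ofList criteria).foldl pvCountStep PySem.Dict.empty
  pvScan counts pvRules

-- ===== PRECONDITION & SPEC =====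
def Spec_determine_classification_py (criteria : List String) (out : String) : Prop := out = determine_classification_py_alt criteria
instance (criteria : List String) (out : String) : Decidable (Spec_determine_classification_py criteria out) := by unfold Spec_determine_classification_py; infer_instance

-- ===== CLAIM (what is proved, stated in full; the proofs are below) =====
def Claim_equal_determine_classification_py : Prop := ∀ (criteria : List String), Dom_determine_classification_py criteria → Spec_determine_classification_py criteria (determine_classification_py criteria)

-- ===== LEMMAS AND PROOFS =====

-- a string starts with at most one of the seven category prefixes
theorem pvExcl (c p q : String) (hp : p ∈ pvPrefixes) (hq : q ∈ pvPrefixes) (hne : p ≠ q)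
    (h : PySem.Str.startswith c q = true) : PySem.Str.startswith c p = false := by
  simp only [pvPrefixes, List.mem_cons, List.not_mem_nil, or_false] at hp hq
  rcases hp with rfl | rfl | rfl | rfl | rfl | rfl | rfl <;>
    rcases hq with rfl | rfl | rfl | rfl | rfl | rfl | rfl <;>
      first
        | exact absurd rfl hne
        | (simp only [pysem] at h ⊢
           rw [← Bool.not_eq_true, PySem.Chars.startswith_iff]
           intro hc
           rcases List.prefix_or_prefix_of_prefix hc h with h1 | h1 <;> revert h1 <;> decide)

-- B's counting loop computes, at each of the seven prefixes, the length of A's filtered list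
theorem getD_foldl_pvCountStep (l : List String) (d : PySem.Dict String Int) (p : String)
    (hp : p ∈ pvPrefixes) :
    (l.foldl pvCountStep d).getD p 0 =
      d.getD p 0 + ((l.filter (fun c => PySem.Str.startswith c p)).length : Int) := by
  induction l generalizing d with
  | nil => simp
  | cons c cs ih =>
    rw [List.foldl_cons, ih]
    unfold pvCountStep
    cases hfind : pvPrefixes.find? (fun q => PySem.Str.startswith c q) with
    | none =>
      have hnp : ¬ PySem.Str.startswith c p = true := by
        have := List.find?_eq_none.mp hfind p hp
        simpa using this
      simp only [pysem] at hnp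
      simp [pysem, hnp]
    | some q =>
      have hq : q ∈ pvPrefixes := List.mem_of_find?_eq_some hfind
      have hsq : PySem.Str.startswith c q = true := List.find?_some hfind
      by_cases hpq : p = q
      · subst hpq
        rw [PySem.Dict.getD_insert_self]
        simp only [List.filter_cons, hsq, if_pos, List.length_cons]
        push_cast
        ring
      · have hnp : PySem.Str.startswith c p = false := pvExcl c p q hp hq hpq hsq
        rw [PySem.Dict.getD_insert, if_neg hpq]
        simp only [pysem] at hnp
        simp [pysem, hnp]

-- the two decision cascades agree as functions of the seven category counts
theorem cascade_eq (npvs nps npm npp nba nbs nbp : Nat) :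
  (if 0 < nba then "Benign"
   else if 2 ≤ nbs then "Benign"
   else if 0 < nbs ∧ 0 < nbp then "Likely Benign"
   else if 2 ≤ nbp then "Likely Benign"
   else if 0 < npvs ∧ (0 < nps ∨ 1 ≤ npm) then "Pathogenic"
   else if 2 ≤ nps then "Pathogenic"
   else if 0 < nps ∧ (1 ≤ npm ∨ 2 ≤ npp) then "Pathogenic"
   else if 0 < npvs ∧ (0 < npm ∨ 0 < npp) then "Likely Pathogenic"
   else if 0 < nps ∧ (0 < npm ∨ 0 < npp) then "Likely Pathogenic"
   else if 3 ≤ npm then "Likely Pathogenic"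
   else if 2 ≤ npm ∧ 2 ≤ npp then "Likely Pathogenic"
   else if 0 < npvs ∨ 0 < nps ∨ 0 < npm ∨ 0 < npp then "VUS"
   else if 0 < nbs ∨ 0 < nbp then "Likely Benign"
   else "VUS") =
  (if (1:Int) ≤ (nba:Int) ∨ (2:Int) ≤ (nbs:Int) then "Benign"
   else if (1:Int) ≤ (nbs:Int) ∧ (1:Int) ≤ (nbp:Int) ∨ (2:Int) ≤ (nbp:Int) then "Likely Benign"
   else if (1:Int) ≤ (npvs:Int) ∧ (1:Int) ≤ (nps:Int) ∨ (1:Int) ≤ (npvs:Int) ∧ (1:Int) ≤ (npm:Int) ∨ (2:Int) ≤ (nps:Int) ∨ (1:Int) ≤ (nps:Int) ∧ (1:Int) ≤ (npm:Int) ∨ (1:Int) ≤ (nps:Int) ∧ (2:Int) ≤ (npp:Int) then "Pathogenic"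
   else if (1:Int) ≤ (npvs:Int) ∧ (1:Int) ≤ (npm:Int) ∨ (1:Int) ≤ (npvs:Int) ∧ (1:Int) ≤ (npp:Int) ∨ (1:Int) ≤ (nps:Int) ∧ (1:Int) ≤ (npm:Int) ∨ (1:Int) ≤ (nps:Int) ∧ (1:Int) ≤ (npp:Int) ∨ (3:Int) ≤ (npm:Int) ∨ (2:Int) ≤ (npm:Int) ∧ (2:Int) ≤ (npp:Int) then "Likely Pathogenic"
   else if (1:Int) ≤ (npvs:Int) ∨ (1:Int) ≤ (nps:Int) ∨ (1:Int) ≤ (npm:Int) ∨ (1:Int) ≤ (npp:Int) then "VUS"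
   else if (1:Int) ≤ (nbs:Int) ∨ (1:Int) ≤ (nbp:Int) then "Likely Benign"
   else "VUS") := by
  by_cases h0 : 0 < nba
  · rw [if_pos h0]
    rw [if_pos (by omega)]
  · rw [if_neg h0]
    by_cases h1 : 2 ≤ nbs
    · rw [if_pos h1]
      rw [if_pos (by omega)]
    · rw [if_neg h1]
      by_cases h2 : 0 < nbs ∧ 0 < nbp
      · rw [if_pos h2]
        rw [if_neg (by omega)]
        rw [if_pos (by omega)]
      · rw [if_neg h2]
        by_cases h3 : 2 ≤ nbp
        · rw [if_pos h3]
          rw [if_neg (by omega)]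
          rw [if_pos (by omega)]
        · rw [if_neg h3]
          by_cases h4 : 0 < npvs ∧ (0 < nps ∨ 1 ≤ npm)
          · rw [if_pos h4]
            rw [if_neg (by omega)]
            rw [if_neg (by omega)]
            rw [if_pos (by omega)]
          · rw [if_neg h4]
            by_cases h5 : 2 ≤ nps
            · rw [if_pos h5]
              rw [if_neg (by omega)]
              rw [if_neg (by omega)]
              rw [if_pos (by omega)]
            · rw [if_neg h5]
              by_cases h6 : 0 < nps ∧ (1 ≤ npm ∨ 2 ≤ npp)
              · rw [if_pos h6]
                rw [if_neg (by omega)]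
                rw [if_neg (by omega)]
                rw [if_pos (by omega)]
              · rw [if_neg h6]
                by_cases h7 : 0 < npvs ∧ (0 < npm ∨ 0 < npp)
                · rw [if_pos h7]
                  rw [if_neg (by omega)]
                  rw [if_neg (by omega)]
                  rw [if_neg (by omega)]
                  rw [if_pos (by omega)]
                · rw [if_neg h7]
                  by_cases h8 : 0 < nps ∧ (0 < npm ∨ 0 < npp)
                  · rw [if_pos h8]
                    rw [if_neg (by omega)]
                    rw [if_neg (by omega)]
                    rw [if_neg (by omega)]
                    rw [if_pos (by omega)]
                  · rw [if_neg h8]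
                    by_cases h9 : 3 ≤ npm
                    · rw [if_pos h9]
                      rw [if_neg (by omega)]
                      rw [if_neg (by omega)]
                      rw [if_neg (by omega)]
                      rw [if_pos (by omega)]
                    · rw [if_neg h9]
                      by_cases h10 : 2 ≤ npm ∧ 2 ≤ npp
                      · rw [if_pos h10]
                        rw [if_neg (by omega)]
                        rw [if_neg (by omega)]
                        rw [if_neg (by omega)]
                        rw [if_pos (by omega)]
                      · rw [if_neg h10]
                        by_cases h11 : 0 < npvs ∨ 0 < nps ∨ 0 < npm ∨ 0 < npp
                        · rw [if_pos h11]
                          rw [if_neg (by omega)]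
                          rw [if_neg (by omega)]
                          rw [if_neg (by omega)]
                          rw [if_neg (by omega)]
                          rw [if_pos (by omega)]
                        · rw [if_neg h11]
                          by_cases h12 : 0 < nbs ∨ 0 < nbp
                          · rw [if_pos h12]
                            rw [if_neg (by omega)]
                            rw [if_neg (by omega)]
                            rw [if_neg (by omega)]
                            rw [if_neg (by omega)]
                            rw [if_neg (by omega)]
                            rw [if_pos (by omega)]
                          · rw [if_neg h12]
                            rw [if_neg (by omega)]
                            rw [if_neg (by omega)]
                            rw [if_neg (by omega)]
                            rw [if_neg (by omega)]
                            rw [if_neg (by omega)]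
                            rw [if_neg (by omega)]

theorem ports_eq (criteria : List String) :
    determine_classification_py criteria = determine_classification_py_alt criteria := by
  have hPVS := getD_foldl_pvCountStep (PySem.Set.ofList criteria) PySem.Dict.empty "PVS" (by decide)
  have hPS := getD_foldl_pvCountStep (PySem.Set.ofList criteria) PySem.Dict.empty "PS" (by decide)
  have hPM := getD_foldl_pvCountStep (PySem.Set.ofList criteria) PySem.Dict.empty "PM" (by decide)
  have hPP := getD_foldl_pvCountStep (PySem.Set.ofList criteria) PySem.Dict.empty "PP" (by decide)
  have hBA := getD_foldl_pvCountStep (PySem.Set.ofList criteria) PySem.Dict.empty "BA" (by decide)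
  have hBS := getD_foldl_pvCountStep (PySem.Set.ofList criteria) PySem.Dict.empty "BS" (by decide)
  have hBP := getD_foldl_pvCountStep (PySem.Set.ofList criteria) PySem.Dict.empty "BP" (by decide)
  simp only [PySem.Dict.getD_empty, zero_add] at hPVS hPS hPM hPP hBA hBS hBP
  simp only [determine_classification_py, determine_classification_py_alt, pvRules, pvScan,
    List.any_cons, List.any_nil, List.all_cons, List.all_nil,
    Bool.or_false, Bool.and_true, Bool.or_eq_true, Bool.and_eq_true, decide_eq_true_eq,
    hPVS, hPS, hPM, hPP, hBA, hBS, hBP]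
  generalize (List.filter (fun c => PySem.Str.startswith c "PVS") (PySem.Set.ofList criteria)) = LPVS
  generalize (List.filter (fun c => PySem.Str.startswith c "PS") (PySem.Set.ofList criteria)) = LPS
  generalize (List.filter (fun c => PySem.Str.startswith c "PM") (PySem.Set.ofList criteria)) = LPM
  generalize (List.filter (fun c => PySem.Str.startswith c "PP") (PySem.Set.ofList criteria)) = LPP
  generalize (List.filter (fun c => PySem.Str.startswith c "BA") (PySem.Set.ofList criteria)) = LBA
  generalize (List.filter (fun c => PySem.Str.startswith c "BS") (PySem.Set.ofList criteria)) = LBS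
  generalize (List.filter (fun c => PySem.Str.startswith c "BP") (PySem.Set.ofList criteria)) = LBP
  clear hPVS hPS hPM hPP hBA hBS hBP
  simp only [← List.length_pos_iff]
  exact cascade_eq LPVS.length LPS.length LPM.length LPP.length LBA.length LBS.length LBP.length

-- ===== VERDICT (by name: the statement is the Claim_ definition above) =====
theorem determine_classification_py_spec : Claim_equal_determine_classification_py := by
  intro criteria _
  unfold Spec_determine_classification_py
  exact ports_eq criteria
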